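-- pv_equiv track=rewrite | github.com/Amol2709/DSA | StackandQueue/Integer_Containing_1_2_3.py | solve
-- ===== SOURCE A (Python) =====
-- from collections import deque
--
-- def solve(A):
--     if A<=3:
--         return list(range(1,A+1))
--     ans = [1,2,3]
--     Q=deque()
--     Q.append(1)
--     Q.append(2)
--     Q.append(3)
--
--
--     for i in range(4,A+1):
--         num = Q.popleft()
--         for i in range(1,4):
--             elem = (num*10)+i
--             ans.append(elem)
--             Q.append(elem)
--             if len(ans)==A:
--                 return ans
--     return ans
-- ===== SOURCE B (Python) =====
-- def solve(A):
--     res = []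
--     for n in range(1, A + 1):
--         v = 0
--         p = 1
--         m = n
--         while m > 0:
--             r = m % 3
--             if r == 0:
--                 v += 3 * p
--                 m = m // 3 - 1
--             else:
--                 v += r * p
--                 m //= 3
--             p *= 10
--         res.append(v)
--     return res
-- ===== Notes on version B (the rewrite author's own statement) =====
-- stated objective: alternative
-- what changed: Replaces A's BFS with a deque (each output generated as parent*10+digit from the queue) by computing each of the A outputs independently from its one-based index via bijective base-3 digit extraction, with no queue or shared state between outputs.
import Mathlib
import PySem

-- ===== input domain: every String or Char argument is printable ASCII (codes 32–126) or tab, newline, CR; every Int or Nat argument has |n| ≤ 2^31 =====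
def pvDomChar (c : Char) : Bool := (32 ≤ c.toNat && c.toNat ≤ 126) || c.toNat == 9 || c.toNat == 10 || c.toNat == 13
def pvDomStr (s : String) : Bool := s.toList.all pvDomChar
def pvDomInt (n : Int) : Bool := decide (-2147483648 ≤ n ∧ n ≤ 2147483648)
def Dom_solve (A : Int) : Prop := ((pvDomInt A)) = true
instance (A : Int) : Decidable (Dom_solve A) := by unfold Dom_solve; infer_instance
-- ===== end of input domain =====

-- B replaces A's BFS queue by computing each of the A outputs independently from its
-- one-based index via bijective base-3 digits (objective: alternative algorithm, no queue).

-- ===== PORT A =====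
-- inner 'for i in range(1,4)' body: .inl = early 'return ans', .inr = fall through with new state
def innerA (num A : Int) (ans Q : List Int) : List Int → (List Int ⊕ List Int × List Int)
  | [] => Sum.inr (ans, Q)
  | i :: rest =>
    let elem := num * 10 + i
    let ans' := ans ++ [elem]
    let Q' := Q ++ [elem]
    if (ans'.length : Int) = A then Sum.inl ans'
    else innerA num A ans' Q' rest

-- outer 'for i in range(4,A+1)' loop, iterating (A+1-4).toNat times
def outerA (A : Int) : Nat → List Int → List Int → List Int
  | 0, ans, _ => ans
  | k+1, ans, Q =>
    match Q with
    | [] => ans  -- Python would raise on popleft from an empty deque; never reached here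
    | num :: Qrest =>
      match innerA num A ans Qrest [1, 2, 3] with
      | Sum.inl r => r
      | Sum.inr (ans', Q') => outerA A k ans' Q'

def solve (A : Int) : List Int :=
  if A ≤ 3 then PySem.List.pyRange 1 (A + 1) 1
  else outerA A (A + 1 - 4).toNat [1, 2, 3] [1, 2, 3]

-- ===== PORT B =====
-- the 'while m > 0' loop of Source B, accumulating the value v with place value p
def bLoop (m v p : Int) : Int :=
  if h : 0 < m then
    let r := PySem.Int.mod m 3
    if r = 0 then bLoop (PySem.Int.floordiv m 3 - 1) (v + 3 * p) (p * 10)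
    else bLoop (PySem.Int.floordiv m 3) (v + r * p) (p * 10)
  else v
termination_by m.toNat
decreasing_by
  · rw [PySem.Int.floordiv_eq_ediv_of_pos (by norm_num)]; omega
  · rw [PySem.Int.floordiv_eq_ediv_of_pos (by norm_num)]; omega

def solve_alt (A : Int) : List Int :=
  (PySem.List.pyRange 1 (A + 1) 1).foldl (fun res n => res ++ [bLoop n 0 1]) []

-- ===== PRECONDITION & SPEC =====
def Spec_solve (A : Int) (out : List Int) : Prop := out = solve_alt A
instance (A : Int) (out : List Int) : Decidable (Spec_solve A out) := by unfold Spec_solve; infer_instance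

-- ===== CLAIM (what is proved, stated in full; the proofs are below) =====
def Claim_equal_solve : Prop := ∀ (A : Int), Dom_solve A → Spec_solve A (solve A)

-- ===== LEMMAS AND PROOFS =====

theorem bLoop_zero_not_pos {m : Int} (hm : ¬ 0 < m) (v p : Int) : bLoop m v p = v := by
  rw [bLoop.eq_def]; simp [hm]

theorem bLoop_step_pos {m : Int} (hm : 0 < m) (v p : Int) :
    bLoop m v p = if m % 3 = 0 then bLoop (m / 3 - 1) (v + 3 * p) (p * 10)
                  else bLoop (m / 3) (v + (m % 3) * p) (p * 10) := by
  rw [bLoop.eq_def]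
  simp only [hm, dite_true,
    PySem.Int.mod_eq_emod_of_pos (a := m) (show (0:Int) < 3 by norm_num),
    PySem.Int.floordiv_eq_ediv_of_pos (a := m) (show (0:Int) < 3 by norm_num)]

theorem bLoop_linear (k : Nat) : ∀ (m v p : Int), m.toNat ≤ k → bLoop m v p = v + p * bLoop m 0 1 := by
  induction k with
  | zero =>
    intro m v p h
    have hm : ¬ 0 < m := by omega
    rw [bLoop_zero_not_pos hm, bLoop_zero_not_pos hm]; ring
  | succ k ih =>
    intro m v p h
    by_cases hm : 0 < m
    · rw [bLoop_step_pos hm, bLoop_step_pos hm]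
      by_cases hr : m % 3 = 0
      · rw [if_pos hr, if_pos hr,
          ih (m / 3 - 1) (v + 3 * p) (p * 10) (by omega),
          ih (m / 3 - 1) (0 + 3 * 1) (1 * 10) (by omega)]
        ring
      · rw [if_neg hr, if_neg hr,
          ih (m / 3) (v + m % 3 * p) (p * 10) (by omega),
          ih (m / 3) (0 + m % 3 * 1) (1 * 10) (by omega)]
        ring
    · rw [bLoop_zero_not_pos hm, bLoop_zero_not_pos hm]; ring

-- bijective base-3 recurrence: B's per-index value of 3q+d is (value of q)·10 + d for d ∈ {1,2,3}
theorem bLoop_step {q d : Int} (hq : 0 ≤ q) (hd : 1 ≤ d) (hd3 : d ≤ 3) :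
    bLoop (3 * q + d) 0 1 = 10 * bLoop q 0 1 + d := by
  have hm : 0 < 3 * q + d := by omega
  rw [bLoop_step_pos hm]
  by_cases hr : (3 * q + d) % 3 = 0
  · have hd3' : d = 3 := by omega
    subst hd3'
    have hq' : (3 * q + 3) / 3 - 1 = q := by omega
    rw [if_pos hr, hq', bLoop_linear q.toNat q (0 + 3 * 1) (1 * 10) (le_refl _)]
    ring
  · have hr' : (3 * q + d) % 3 = d := by omega
    have hq' : (3 * q + d) / 3 = q := by omega
    rw [if_neg hr, hr', hq', bLoop_linear q.toNat q (0 + d * 1) (1 * 10) (le_refl _)]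
    ring

theorem bLoop_zero : bLoop 0 0 1 = 0 := bLoop_zero_not_pos (by omega) 0 1

theorem bLoop_one : bLoop 1 0 1 = 1 := by
  have := bLoop_step (q := 0) (d := 1) (by norm_num) (by norm_num) (by norm_num)
  simpa [bLoop_zero] using this

theorem bLoop_two : bLoop 2 0 1 = 2 := by
  have := bLoop_step (q := 0) (d := 2) (by norm_num) (by norm_num) (by norm_num)
  simpa [bLoop_zero] using this

theorem bLoop_three : bLoop 3 0 1 = 3 := by
  have := bLoop_step (q := 0) (d := 3) (by norm_num) (by norm_num) (by norm_num)
  simpa [bLoop_zero] using this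

-- the list [g a, g (a+1), …, g (a+n-1)] of B's per-index values, g i = bLoop i 0 1
def Fm (a n : Nat) : List Int := List.map (fun i : Nat => bLoop (i : Int) 0 1) (List.range' a n)

theorem Fm_length (a n : Nat) : (Fm a n).length = n := by simp [Fm]

theorem Fm_snoc (a n : Nat) : Fm a (n + 1) = Fm a n ++ [bLoop ((a + n : Nat) : Int) 0 1] := by
  unfold Fm
  rw [List.range'_concat]
  simp

theorem Fm_cons (a n : Nat) : Fm a (n + 1) = bLoop (a : Int) 0 1 :: Fm (a + 1) n := by
  simp [Fm, List.range'_succ]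

theorem Fm_append (a m n : Nat) : Fm a m ++ Fm (a + m) n = Fm a (m + n) := by
  unfold Fm
  have h : List.range' a m ++ List.range' (a + m) n = List.range' a (m + n) := by
    have := @List.range'_append a m n 1
    simpa using this
  rw [← List.map_append, h]

-- one full BFS round: popping element k (value g k) appends the values of indices 3k+1..3k+3,
-- returning early exactly when A ∈ {3k+1, 3k+2, 3k+3}
theorem inner_spec (k : Nat) (A : Int) (Q : List Int) (hA : 3 * (k : Int) < A) :
    innerA (bLoop (k : Int) 0 1) A (Fm 1 (3 * k)) Q [1, 2, 3] =
      if A ≤ 3 * (k : Int) + 3 then Sum.inl (Fm 1 A.toNat)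
      else Sum.inr (Fm 1 (3 * k + 3), Q ++ Fm (3 * k + 1) 3) := by
  have hq : (0 : Int) ≤ (k : Int) := by positivity
  have e1 : bLoop (k : Int) 0 1 * 10 + 1 = bLoop ((1 + 3 * k : Nat) : Int) 0 1 := by
    push_cast
    rw [(by ring : (1 : Int) + (3 * k : Int) = 3 * (k : Int) + 1), bLoop_step hq (by norm_num) (by norm_num)]
    ring
  have e2 : bLoop (k : Int) 0 1 * 10 + 2 = bLoop ((1 + (3 * k + 1) : Nat) : Int) 0 1 := by
    push_cast
    rw [(by ring : (1 : Int) + (3 * k + 1 : Int) = 3 * (k : Int) + 2), bLoop_step hq (by norm_num) (by norm_num)]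
    ring
  have e3 : bLoop (k : Int) 0 1 * 10 + 3 = bLoop ((1 + (3 * k + 2) : Nat) : Int) 0 1 := by
    push_cast
    rw [(by ring : (1 : Int) + (3 * k + 2 : Int) = 3 * (k : Int) + 3), bLoop_step hq (by norm_num) (by norm_num)]
    ring
  have app1 : Fm 1 (3 * k) ++ [bLoop ((1 + 3 * k : Nat) : Int) 0 1] = Fm 1 (3 * k + 1) :=
    (Fm_snoc 1 (3 * k)).symm
  have app2 : Fm 1 (3 * k + 1) ++ [bLoop ((1 + (3 * k + 1) : Nat) : Int) 0 1] = Fm 1 (3 * k + 2) :=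
    (Fm_snoc 1 (3 * k + 1)).symm
  have app3 : Fm 1 (3 * k + 2) ++ [bLoop ((1 + (3 * k + 2) : Nat) : Int) 0 1] = Fm 1 (3 * k + 3) :=
    (Fm_snoc 1 (3 * k + 2)).symm
  simp only [innerA, e1, e2, e3, app1]
  by_cases h1 : A = 3 * (k : Int) + 1
  · have hl : ((Fm 1 (3 * k + 1)).length : Int) = A := by rw [Fm_length]; push_cast; omega
    have hAt : A.toNat = 3 * k + 1 := by omega
    rw [if_pos hl, if_pos (by omega : A ≤ 3 * (k : Int) + 3), hAt]
  · have hl : ¬ ((Fm 1 (3 * k + 1)).length : Int) = A := by rw [Fm_length]; push_cast; omega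
    rw [if_neg hl]
    simp only [app2]
    by_cases h2 : A = 3 * (k : Int) + 2
    · have hl2 : ((Fm 1 (3 * k + 2)).length : Int) = A := by rw [Fm_length]; push_cast; omega
      have hAt : A.toNat = 3 * k + 2 := by omega
      rw [if_pos hl2, if_pos (by omega : A ≤ 3 * (k : Int) + 3), hAt]
    · have hl2 : ¬ ((Fm 1 (3 * k + 2)).length : Int) = A := by rw [Fm_length]; push_cast; omega
      rw [if_neg hl2]
      simp only [app3]
      by_cases h3 : A = 3 * (k : Int) + 3
      · have hl3 : ((Fm 1 (3 * k + 3)).length : Int) = A := by rw [Fm_length]; push_cast; omega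
        have hAt : A.toNat = 3 * k + 3 := by omega
        rw [if_pos hl3, if_pos (by omega : A ≤ 3 * (k : Int) + 3), hAt]
      · have hl3 : ¬ ((Fm 1 (3 * k + 3)).length : Int) = A := by rw [Fm_length]; push_cast; omega
        rw [if_neg hl3, if_neg (by omega : ¬ A ≤ 3 * (k : Int) + 3)]
        have hQ : Q ++ [bLoop ((1 + 3 * k : Nat) : Int) 0 1] ++ [bLoop ((1 + (3 * k + 1) : Nat) : Int) 0 1]
            ++ [bLoop ((1 + (3 * k + 2) : Nat) : Int) 0 1] = Q ++ Fm (3 * k + 1) 3 := by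
          simp only [List.append_assoc]
          congr 1
          rw [Fm_cons, Fm_cons, Fm_cons]
          have c1 : ((3 * k + 1 : Nat) : Int) = ((1 + 3 * k : Nat) : Int) := by push_cast; ring
          have c2 : ((3 * k + 1 + 1 : Nat) : Int) = ((1 + (3 * k + 1) : Nat) : Int) := by push_cast; ring
          have c3 : ((3 * k + 1 + 1 + 1 : Nat) : Int) = ((1 + (3 * k + 2) : Nat) : Int) := by push_cast; ring
          simp [Fm, c1, c2, c3]
        rw [hQ]

-- BFS invariant: before pop k, ans holds the first 3k values and Q the values of indices k..3k
theorem outer_spec : ∀ (r k : Nat) (A : Int), 3 * (k : Int) < A →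
    A ≤ 3 * (k : Int) + 3 * (r : Int) →
    outerA A r (Fm 1 (3 * k)) (Fm k (2 * k + 1)) = Fm 1 A.toNat := by
  intro r
  induction r with
  | zero => intro k A h1 h2; push_cast at h2; omega
  | succ r ih =>
    intro k A h1 h2
    rw [Fm_cons]
    show (match innerA (bLoop (k : Int) 0 1) A (Fm 1 (3 * k)) (Fm (k + 1) (2 * k)) [1, 2, 3] with
      | Sum.inl r => r
      | Sum.inr (ans', Q') => outerA A r ans' Q') = Fm 1 A.toNat
    rw [inner_spec k A _ h1]
    by_cases hc : A ≤ 3 * (k : Int) + 3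
    · rw [if_pos hc]
    · rw [if_neg hc]
      have hQ : Fm (k + 1) (2 * k) ++ Fm (3 * k + 1) 3 = Fm (k + 1) (2 * (k + 1) + 1) := by
        have h := Fm_append (k + 1) (2 * k) 3
        have harg : k + 1 + 2 * k = 3 * k + 1 := by omega
        rw [harg] at h
        rw [show 2 * (k + 1) + 1 = 2 * k + 3 from by omega]
        exact h
      have hans : (3 * k + 3 : Nat) = 3 * (k + 1) := by omega
      show outerA A r (Fm 1 (3 * k + 3)) (Fm (k + 1) (2 * k) ++ Fm (3 * k + 1) 3) = Fm 1 A.toNat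
      rw [hQ, hans]
      exact ih (k + 1) A (by push_cast; omega) (by push_cast at h2 ⊢; omega)

theorem foldl_append_map (g : Int → Int) (xs : List Int) :
    ∀ acc : List Int, xs.foldl (fun res n => res ++ [g n]) acc = acc ++ xs.map g := by
  induction xs with
  | nil => intro acc; simp
  | cons x xs ih => intro acc; simp [List.foldl_cons, ih]

theorem solve_alt_eq_map (A : Int) :
    solve_alt A = (PySem.List.pyRange 1 (A + 1) 1).map (fun n => bLoop n 0 1) := by
  unfold solve_alt
  rw [foldl_append_map]
  simp

theorem pyRange_map_eq_Fm : ∀ n : Nat,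
    (PySem.List.pyRange 1 ((n : Int) + 1) 1).map (fun x => bLoop x 0 1) = Fm 1 n := by
  intro n
  induction n with
  | zero =>
    rw [PySem.List.pyRange_one]
    simp [Fm]
  | succ n ih =>
    have h : ((n + 1 : Nat) : Int) + 1 = ((n : Int) + 1) + 1 := by push_cast; ring
    rw [h, PySem.List.pyRange_one_succ_right (by omega), List.map_append, ih, Fm_snoc]
    simp
    ring_nf

theorem solve_main (A : Int) : solve A = solve_alt A := by
  unfold solve
  by_cases hA : A ≤ 3
  · rw [if_pos hA, solve_alt_eq_map]
    symm
    conv_rhs => rw [← List.map_id (PySem.List.pyRange 1 (A + 1) 1)]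
    apply List.map_congr_left
    intro x hx
    rw [PySem.List.mem_pyRange_one] at hx
    have hx1 : 1 ≤ x := hx.1
    have hx2 : x ≤ 3 := by omega
    interval_cases x
    · exact bLoop_one
    · exact bLoop_two
    · exact bLoop_three
  · rw [if_neg hA, solve_alt_eq_map]
    have hmap := pyRange_map_eq_Fm A.toNat
    have hAe : ((A.toNat : Nat) : Int) = A := by omega
    rw [hAe] at hmap
    rw [hmap]
    have h3 : ([1, 2, 3] : List Int) = Fm 1 3 := by
      rw [Fm_cons, Fm_cons, Fm_snoc]
      norm_num [bLoop_one, bLoop_two, bLoop_three, Fm]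
    rw [h3]
    have := outer_spec (A + 1 - 4).toNat 1 A (by push_cast; omega) (by push_cast; omega)
    norm_num at this
    exact this

-- ===== VERDICT (by name: the statement is the Claim_ definition above) =====
theorem solve_spec : Claim_equal_solve := by
  intro A _
  unfold Spec_solve
  exact solve_main A
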